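-- pv_equiv track=rewrite | github.com/jpridia894/programacion-ia | TEMA 1/4- Ejercicios de funciones/Ejercicio2.py | digit_n
-- ===== SOURCE A (Python) =====
-- def digits(num: int):
--     num = abs(num)
--     # caso de número 0
--     if num == 0:
--         return 1
--
--     digitos = 0
--     while num > 0:
--         # a cada digito eliminado se suma al marcador
--         num //= 10
--         digitos += 1
--
--     return digitos
--
-- def digit_n(numero: int, posicion: int):
--
--     # valor absoluto por si el num es negativo
--     numero = abs(numero)
--
--     # contamos el numero de digitos
--     digitos = 0
--     num_temporal = numero
--     if num_temporal == 0:
--         digitos = 1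
--     else:
--         digitos = digits(num_temporal)
--
--     # si la posicion no existe devolvemos -1
--     if posicion < 0 or posicion >= digitos:
--         return -1
--
--     # extraer el dígito de izquierda a derecha
--     # si el numero = 75342 y posición = 2 (3), debemos eliminar los (total_digitos - posicion - 1) digitos de la derecha
--     for _ in range(digitos - posicion - 1):
--         numero //= 10
--
--     # el ultimo digito es el que queremos
--     return numero % 10
-- ===== SOURCE B (Python) =====
-- def digit_n(numero: int, posicion: int):
--     s = str(abs(numero))
--     if posicion < 0 or posicion >= len(s):
--         return -1
--     return int(s[posicion])
-- ===== Notes on version B (the rewrite author's own statement) =====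
-- stated objective: idiomatic
-- what changed: Replaces the digit-counting while-loop and the trailing-strip division loop with the decimal string str(abs(numero)) indexed directly at the left-to-right position.
import Mathlib
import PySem

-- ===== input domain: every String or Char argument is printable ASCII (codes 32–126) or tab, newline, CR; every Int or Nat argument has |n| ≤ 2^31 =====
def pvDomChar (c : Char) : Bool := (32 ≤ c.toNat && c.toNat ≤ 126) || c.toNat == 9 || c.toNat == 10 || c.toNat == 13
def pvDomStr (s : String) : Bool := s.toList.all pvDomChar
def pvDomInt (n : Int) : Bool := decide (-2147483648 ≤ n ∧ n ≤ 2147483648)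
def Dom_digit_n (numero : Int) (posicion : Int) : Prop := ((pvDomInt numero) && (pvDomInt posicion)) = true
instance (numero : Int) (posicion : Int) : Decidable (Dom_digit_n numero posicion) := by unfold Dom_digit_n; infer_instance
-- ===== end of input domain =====

-- B replaces A's two division loops (digit count, then trailing strip) by indexing
-- the decimal string of |numero| directly at the left-to-right position (idiomatic).

-- ===== PORT A =====
-- while num > 0: num //= 10; digitos += 1
def digitsLoop (num : Int) (digitos : Int) : Int :=
  if h : 0 < num then digitsLoop (PySem.Int.floordiv num 10) (digitos + 1) else digitos
termination_by num.toNat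
decreasing_by
  rw [PySem.Int.floordiv_eq_ediv_of_pos (by norm_num)]
  omega

-- Python helper `digits`
def digits_fn (num : Int) : Int :=
  let n := |num|
  if n = 0 then 1 else digitsLoop n 0

def digit_n (numero : Int) (posicion : Int) : Int :=
  let n := |numero|
  let digitos := if n = 0 then (1 : Int) else digits_fn n
  if posicion < 0 ∨ digitos ≤ posicion then -1
  else
    PySem.Int.mod
      ((PySem.List.pyRange 0 (digitos - posicion - 1) 1).foldl
        (fun acc _ => PySem.Int.floordiv acc 10) n) 10

-- ===== PORT B =====
def digit_n_alt (numero : Int) (posicion : Int) : Int :=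
  let s := PySem.Int.toChars |numero|          -- s = str(abs(numero))
  if posicion < 0 ∨ (s.length : Int) ≤ posicion then -1
  else
    match PySem.List.pyGet? s posicion with    -- s[posicion]
    | some c => (PySem.Int.ofChars? [c]).getD (-1)   -- int(s[posicion]); always a digit here
    | none => -1

-- ===== PRECONDITION & SPEC =====
def Spec_digit_n (numero : Int) (posicion : Int) (out : Int) : Prop := out = digit_n_alt numero posicion
instance (numero : Int) (posicion : Int) (out : Int) : Decidable (Spec_digit_n numero posicion out) := by unfold Spec_digit_n; infer_instance

-- ===== CLAIM (what is proved, stated in full; the proofs are below) =====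
def Claim_equal_digit_n : Prop := ∀ (numero : Int) (posicion : Int), Dom_digit_n numero posicion → Spec_digit_n numero posicion (digit_n numero posicion)

-- ===== LEMMAS AND PROOFS =====

lemma countLoop_eq : ∀ (n : Nat), 0 < n → ∀ acc : Int,
    digitsLoop (n : Int) acc = acc + ((Nat.digits 10 n).length : Int) := by
  intro n
  induction n using Nat.strong_induction_on with
  | _ n ih =>
    intro hn acc
    rw [digitsLoop]
    rw [dif_pos (by exact_mod_cast hn)]
    have hfd : PySem.Int.floordiv (n : Int) 10 = ((n / 10 : Nat) : Int) := by
      exact_mod_cast PySem.Int.floordiv_natCast n 10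
    rw [hfd]
    rcases Nat.eq_zero_or_pos (n / 10) with h0 | hpos
    · rw [h0]
      rw [digitsLoop, dif_neg (by omega)]
      rw [Nat.digits_def' (by norm_num) hn, h0]
      simp
    · rw [ih (n / 10) (Nat.div_lt_self hn (by norm_num)) hpos (acc + 1)]
      rw [Nat.digits_def' (by norm_num) hn]
      simp only [List.length_cons]
      push_cast
      ring

lemma strip_eq (n : Nat) : ∀ (k : Nat),
    (PySem.List.pyRange 0 (k : Int) 1).foldl (fun acc _ => PySem.Int.floordiv acc 10) (n : Int)
      = ((n / 10 ^ k : Nat) : Int) := by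
  intro k
  induction k with
  | zero => simp [PySem.List.pyRange_one_eq_nil]
  | succ k ih =>
    have hcast : ((k + 1 : Nat) : Int) = (k : Int) + 1 := by push_cast; ring
    rw [hcast, PySem.List.pyRange_one_succ_right (by positivity), List.foldl_append, ih]
    show PySem.Int.floordiv ((n / 10 ^ k : Nat) : Int) 10 = _
    have : PySem.Int.floordiv ((n / 10 ^ k : Nat) : Int) 10 = ((n / 10 ^ k / 10 : Nat) : Int) := by
      exact_mod_cast PySem.Int.floordiv_natCast (n / 10 ^ k) 10
    rw [this, Nat.div_div_eq_div_mul, ← pow_succ]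

lemma tdc_eq : ∀ (f : Nat) (n : Nat) (acc : List Char), 0 < n → n < 10 ^ f →
    Nat.toDigitsCore 10 f n acc = ((Nat.digits 10 n).map Nat.digitChar).reverse ++ acc := by
  intro f
  induction f with
  | zero => intro n acc h1 h2; simp at h2; omega
  | succ f ih =>
    intro n acc h1 h2
    rw [Nat.toDigitsCore]
    rcases Nat.eq_zero_or_pos (n / 10) with h0 | hpos
    · rw [if_pos h0]
      rw [Nat.digits_def' (by norm_num) h1, h0]
      simp
    · rw [if_neg (by omega)]
      rw [ih (n / 10) _ hpos
        ((Nat.div_lt_iff_lt_mul (by norm_num)).mpr (by rw [pow_succ] at h2; exact h2))]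
      rw [Nat.digits_def' (by norm_num) h1]
      simp

lemma toChars_pos (n : Nat) (hn : 0 < n) :
    PySem.Int.toChars (n : Int) = ((Nat.digits 10 n).map Nat.digitChar).reverse := by
  have hlt : n < 10 ^ (n + 1) := by
    calc n < 10 ^ n := Nat.lt_pow_self (by norm_num)
    _ ≤ 10 ^ (n + 1) := Nat.pow_le_pow_right (by norm_num) (Nat.le_succ n)
  simp only [PySem.Int.toChars, if_neg (by omega : ¬ (n : Int) < 0), Int.toNat_natCast]
  rw [Nat.toDigits, tdc_eq (n + 1) n [] hn hlt, List.append_nil]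

lemma ofChars_digitChar (m : Nat) (hm : m < 10) :
    PySem.Int.ofChars? [Nat.digitChar m] = some (m : Int) := by
  interval_cases m <;> decide

theorem digit_n_eq_alt (numero posicion : Int) : digit_n numero posicion = digit_n_alt numero posicion := by
  have habs : |numero| = (numero.natAbs : Int) := Int.abs_eq_natAbs numero
  rcases Nat.eq_zero_or_pos numero.natAbs with h0 | hpos
  · have hz : numero = 0 := by omega
    subst hz
    by_cases h1 : posicion < 0 ∨ (1 : Int) ≤ posicion
    · have hA : digit_n 0 posicion = -1 := by
        simp [digit_n, h1]
      have hB : digit_n_alt 0 posicion = -1 := by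
        simp [digit_n_alt, show PySem.Int.toChars (0 : Int) = ['0'] from rfl, h1]
      rw [hA, hB]
    · have : posicion = 0 := by omega
      subst this
      decide
  · set n := numero.natAbs with hn
    set l := Nat.digits 10 n with hl
    set d := l.length with hd
    have hd1 : 1 ≤ d := by
      have : l ≠ [] := Nat.digits_ne_nil_iff_ne_zero.mpr (by omega)
      have := List.length_pos_iff.mpr this
      omega
    have hdfn : digits_fn (n : Int) = (d : Int) := by
      simp only [digits_fn]
      rw [abs_of_nonneg (by positivity),
        if_neg (show ¬ (n : Int) = 0 by exact_mod_cast Nat.pos_iff_ne_zero.mp hpos),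
        countLoop_eq n hpos 0]
      ring
    have hA : digit_n numero posicion =
        if posicion < 0 ∨ (d : Int) ≤ posicion then -1
        else PySem.Int.mod ((PySem.List.pyRange 0 ((d : Int) - posicion - 1) 1).foldl
          (fun acc _ => PySem.Int.floordiv acc 10) (n : Int)) 10 := by
      simp only [digit_n, habs]
      rw [if_neg (show ¬ (n : Int) = 0 by exact_mod_cast Nat.pos_iff_ne_zero.mp hpos), hdfn]
    have hlen : ((l.map Nat.digitChar).reverse).length = d := by simp [hd]
    have hB : digit_n_alt numero posicion =
        if posicion < 0 ∨ (d : Int) ≤ posicion then -1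
        else match PySem.List.pyGet? ((l.map Nat.digitChar).reverse) posicion with
          | some c => (PySem.Int.ofChars? [c]).getD (-1)
          | none => -1 := by
      simp only [digit_n_alt, habs, toChars_pos n hpos, ← hl, hlen]
    rw [hA, hB]
    by_cases hc : posicion < 0 ∨ (d : Int) ≤ posicion
    · rw [if_pos hc, if_pos hc]
    · rw [if_neg hc, if_neg hc]
      push Not at hc
      obtain ⟨hp0, hpd⟩ := hc
      set i := posicion.toNat with hi
      have hpi : posicion = (i : Int) := by omega
      have hid : i < d := by omega
      have hb1 : (d : Int) - posicion - 1 = ((d - i - 1 : Nat) : Int) := by omega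
      rw [hb1, strip_eq n (d - i - 1)]
      have hmod : PySem.Int.mod ((n / 10 ^ (d - i - 1) : Nat) : Int) 10
          = ((n / 10 ^ (d - i - 1) % 10 : Nat) : Int) := by
        exact_mod_cast PySem.Int.mod_natCast (n / 10 ^ (d - i - 1)) 10
      rw [hmod]
      have hget : PySem.List.pyGet? ((l.map Nat.digitChar).reverse) posicion
          = some (((l.map Nat.digitChar).reverse)[i]'(by rw [hlen]; exact hid)) := by
        rw [hpi, PySem.List.pyGet?_natCast]
        exact List.getElem?_eq_getElem (by rw [hlen]; exact hid)
      rw [hget]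
      have hrev : ((l.map Nat.digitChar).reverse)[i]'(by rw [hlen]; exact hid)
          = Nat.digitChar (l[d - 1 - i]'(by omega)) := by
        rw [List.getElem_reverse]
        rw [List.getElem_map]
        congr 1
        simp [hd]
      rw [hrev]
      show _ = (PySem.Int.ofChars? [Nat.digitChar (l[d - 1 - i]'(by omega))]).getD (-1)
      rw [ofChars_digitChar _ (Nat.digits_lt_base (by norm_num) (List.getElem_mem _))]
      rw [Option.getD_some]
      have hgd : l[d - 1 - i]'(by omega) = l.getD (d - 1 - i) 0 :=
        (List.getD_eq_getElem l 0 (by omega)).symm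
      rw [hgd, hl, Nat.getD_digits n (d - 1 - i) (by norm_num)]
      have he : d - i - 1 = d - 1 - i := by omega
      rw [he]

-- ===== VERDICT (by name: the statement is the Claim_ definition above) =====
theorem digit_n_spec : Claim_equal_digit_n := by
  intro numero posicion _
  show digit_n numero posicion = digit_n_alt numero posicion
  exact digit_n_eq_alt numero posicion
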